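-- pv_equiv track=rewrite | github.com/Lushenwar/bwf | src/feature_engine.py | _max_consecutive_from_scores
-- ===== SOURCE A (Python) =====
-- def _max_consecutive_from_scores(scores: list[tuple[int, int]], team_index: int) -> int:
--     if not scores or len(scores) < 2:
--         return 0
--     max_streak = 0
--     current_streak = 0
--     for i in range(1, len(scores)):
--         prev = scores[i - 1][team_index]
--         curr = scores[i][team_index]
--         if curr > prev:
--             current_streak += 1
--             max_streak = max(max_streak, current_streak)
--         else:
--             current_streak = 0
--     return max_streak
-- ===== SOURCE B (Python) =====
-- from itertools import groupby
--
--
-- def _max_consecutive_from_scores(scores: list[tuple[int, int]], team_index: int) -> int: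
--     flags = [b[team_index] > a[team_index] for a, b in zip(scores, scores[1:])]
--     return max((sum(1 for _ in grp) for key, grp in groupby(flags) if key), default=0)
-- ===== Notes on version B (the rewrite author's own statement) =====
-- stated objective: idiomatic
-- what changed: Replaces the index loop with two explicit streak counters by building the list of pairwise increase flags and taking the longest run of True via itertools.groupby with max(..., default=0).
import Mathlib
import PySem

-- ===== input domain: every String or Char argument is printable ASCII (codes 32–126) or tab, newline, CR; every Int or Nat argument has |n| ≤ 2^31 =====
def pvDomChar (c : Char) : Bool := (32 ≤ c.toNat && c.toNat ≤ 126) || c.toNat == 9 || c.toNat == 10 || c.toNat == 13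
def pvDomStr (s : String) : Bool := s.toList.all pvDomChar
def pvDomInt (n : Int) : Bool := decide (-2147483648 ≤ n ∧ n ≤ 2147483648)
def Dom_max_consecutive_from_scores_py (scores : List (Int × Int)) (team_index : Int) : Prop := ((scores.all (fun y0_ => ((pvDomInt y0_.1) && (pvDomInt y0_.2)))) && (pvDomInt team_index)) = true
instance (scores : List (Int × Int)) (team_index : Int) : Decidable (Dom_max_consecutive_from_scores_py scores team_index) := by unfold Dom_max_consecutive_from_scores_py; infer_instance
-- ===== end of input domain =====

-- B replaces A's index loop with explicit streak counters by a pairwise-flag list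
-- and the longest run of True via groupby (idiomatic decomposition; same O(n) cost).

-- ===== PORT A =====
-- tuple indexing p[t] for a pair, t possibly negative (Python tuple index);
-- Pre_ guarantees t is in range wherever A evaluates it, so the default is never used
def tupGet (p : Int × Int) (t : Int) : Int := PySem.List.pyGetD [p.1, p.2] t 0

-- literal port of A: 'if not scores or len(scores) < 2' collapses to len < 2;
-- the for-loop over range(1, len(scores)) is the foldl over pyRange with state (max_streak, current_streak)
def max_consecutive_from_scores_py (scores : List (Int × Int)) (team_index : Int) : Int :=
  if scores.length < 2 then 0
  else
    ((PySem.List.pyRange 1 scores.length 1).foldl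
      (fun (st : Int × Int) i =>
        let prev := tupGet (PySem.List.pyGetD scores (i - 1) (0, 0)) team_index
        let curr := tupGet (PySem.List.pyGetD scores i (0, 0)) team_index
        if curr > prev then (max st.1 (st.2 + 1), st.2 + 1) else (st.1, 0))
      (0, 0)).1

-- ===== PORT B =====
-- flags = [b[t] > a[t] for a, b in zip(scores, scores[1:])]
def bFlags (scores : List (Int × Int)) (t : Int) : List Bool :=
  (scores.zip scores.tail).map (fun ab => decide (tupGet ab.2 t > tupGet ab.1 t))

-- itertools.groupby rendered as run-length groups of equal adjacent elements
def bRuns : List Bool → List (Bool × Int)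
  | [] => []
  | x :: xs =>
    match bRuns xs with
    | [] => [(x, 1)]
    | (k, n) :: rest => if x = k then (x, n + 1) :: rest else (x, 1) :: (k, n) :: rest

-- max((len of grp for key, grp in groupby(flags) if key), default=0):
-- lengths of the True groups, folded with max from 0 (all group lengths are ≥ 1)
def max_consecutive_from_scores_py_alt (scores : List (Int × Int)) (team_index : Int) : Int :=
  (((bRuns (bFlags scores team_index)).filterMap
      (fun kn => if kn.1 then some kn.2 else none)).foldl max 0)

-- ===== PRECONDITION & SPEC =====
-- Pre_ excludes exactly the inputs where A raises IndexError: team_index out of range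
-- for a 2-tuple while the loop runs (len ≥ 2); B raises there too.
def Pre_max_consecutive_from_scores_py (scores : List (Int × Int)) (team_index : Int) : Prop :=
  2 ≤ scores.length → PySem.Raise.InRange 2 team_index
instance (scores : List (Int × Int)) (team_index : Int) : Decidable (Pre_max_consecutive_from_scores_py scores team_index) := by unfold Pre_max_consecutive_from_scores_py; infer_instance
def pvWitness_max_consecutive_from_scores_py : (List (Int × Int)) × Int := ([(0, 0), (1, 2), (2, 1)], 1)

def Spec_max_consecutive_from_scores_py (scores : List (Int × Int)) (team_index : Int) (out : Int) : Prop := out = max_consecutive_from_scores_py_alt scores team_index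
instance (scores : List (Int × Int)) (team_index : Int) (out : Int) : Decidable (Spec_max_consecutive_from_scores_py scores team_index out) := by unfold Spec_max_consecutive_from_scores_py; infer_instance

-- ===== CLAIM (what is proved, stated in full; the proofs are below) =====
def Claim_equal_max_consecutive_from_scores_py : Prop := ∀ (scores : List (Int × Int)) (team_index : Int), Dom_max_consecutive_from_scores_py scores team_index → Pre_max_consecutive_from_scores_py scores team_index → Spec_max_consecutive_from_scores_py scores team_index (max_consecutive_from_scores_py scores team_index)

-- ===== LEMMAS AND PROOFS =====

-- length of the leading run of `true`s
def lead : List Bool → Int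
  | [] => 0
  | true :: xs => 1 + lead xs
  | false :: _ => 0

-- length of the longest run of `true`s
def maxRun : List Bool → Int
  | [] => 0
  | x :: xs => if x then max (1 + lead xs) (maxRun xs) else maxRun xs

-- A's loop body, as a function of the current flag
def stepf (st : Int × Int) (f : Bool) : Int × Int :=
  if f then (max st.1 (st.2 + 1), st.2 + 1) else (st.1, 0)

theorem lead_nonneg (l : List Bool) : 0 ≤ lead l := by
  induction l with
  | nil => simp [lead]
  | cons x xs ih => cases x <;> simp [lead] <;> omega

theorem maxRun_nonneg (l : List Bool) : 0 ≤ maxRun l := by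
  induction l with
  | nil => simp [maxRun]
  | cons x xs ih => cases x <;> simp [maxRun] <;> omega

theorem lead_le_maxRun (l : List Bool) : lead l ≤ maxRun l := by
  induction l with
  | nil => simp [lead, maxRun]
  | cons x xs ih =>
    cases x
    · simpa [lead, maxRun] using maxRun_nonneg xs
    · simp [lead, maxRun]

-- A's streak fold characterised by lead/maxRun
theorem foldl_step_eq (l : List Bool) : ∀ (m c : Int), 0 ≤ c → c ≤ m →
    (l.foldl stepf (m, c)).1 = max m (max (c + lead l) (maxRun l)) := by
  induction l with
  | nil =>
    intro m c h0 h1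
    simp only [List.foldl_nil, lead, maxRun]
    omega
  | cons x xs ih =>
    intro m c h0 h1
    cases x
    · have hml := lead_le_maxRun xs
      have hnn := maxRun_nonneg xs
      simp only [List.foldl_cons, stepf, Bool.false_eq_true, if_false]
      rw [ih m 0 le_rfl (by omega)]
      simp only [lead, maxRun, Bool.false_eq_true, if_false]
      omega
    · have hl := lead_nonneg xs
      simp only [List.foldl_cons]
      rw [show stepf (m, c) true = (max m (c + 1), c + 1) from by simp [stepf]]
      rw [ih (max m (c + 1)) (c + 1) (by omega) (by omega)]
      simp [lead, maxRun]
      omega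

theorem bRuns_nil_iff (l : List Bool) : bRuns l = [] ↔ l = [] := by
  cases l with
  | nil => simp [bRuns]
  | cons x xs =>
    simp only [bRuns, List.cons_ne_nil, iff_false]
    rcases hb : bRuns xs with _ | ⟨⟨k, n⟩, rest⟩
    · simp
    · by_cases hxk : x = k <;> simp [hxk]

-- head of bRuns: its key is the head element, its count is the leading run length
theorem bRuns_head : ∀ (l : List Bool) (k : Bool) (n : Int) (rest : List (Bool × Int)),
    bRuns l = (k, n) :: rest → lead l = (if k then n else 0) := by
  intro l
  induction l with
  | nil => intro k n rest h; simp [bRuns] at h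
  | cons x xs ih =>
    intro k n rest h
    rcases hx : bRuns xs with _ | ⟨⟨k', n'⟩, r⟩
    · have hxe : xs = [] := (bRuns_nil_iff xs).1 hx
      subst hxe
      simp [bRuns] at h
      cases x <;> simp_all [lead]
    · simp only [bRuns, hx] at h
      have hih := ih k' n' r hx
      by_cases hxy : x = k'
      · rw [if_pos hxy] at h
        simp only [List.cons.injEq, Prod.mk.injEq] at h
        obtain ⟨⟨hk, hn⟩, -⟩ := h
        subst hk hn hxy
        cases x <;> simp_all [lead] <;> omega
      · rw [if_neg hxy] at h
        simp only [List.cons.injEq, Prod.mk.injEq] at h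
        obtain ⟨⟨hk, hn⟩, -⟩ := h
        subst hk hn
        cases x <;> cases k' <;> simp_all [lead] <;> omega

theorem fmap_true_cons (n : Int) (rs : List (Bool × Int)) :
    List.filterMap (fun kn => if kn.1 then some kn.2 else none) ((true, n) :: rs)
      = n :: List.filterMap (fun kn => if kn.1 then some kn.2 else none) rs := by simp

theorem fmap_false_cons (n : Int) (rs : List (Bool × Int)) :
    List.filterMap (fun kn => if kn.1 then some kn.2 else none) ((false, n) :: rs)
      = List.filterMap (fun kn => if kn.1 then some kn.2 else none) rs := by simp

theorem foldl_max_max (l : List Int) : ∀ a b : Int, l.foldl max (max a b) = max a (l.foldl max b) := by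
  induction l with
  | nil => intro a b; rfl
  | cons c L ih =>
    intro a b
    simp only [List.foldl_cons]
    rw [max_assoc, ih]

theorem foldl_max_cons (a : Int) (L : List Int) :
    (a :: L).foldl max 0 = max a (L.foldl max 0) := by
  simp only [List.foldl_cons]
  rw [show max (0 : Int) a = max a 0 from max_comm _ _, foldl_max_max]

theorem foldl_max_nonneg (L : List Int) : 0 ≤ L.foldl max 0 := by
  induction L with
  | nil => simp
  | cons a L ih => rw [foldl_max_cons]; omega

-- B's groupby computation equals maxRun
theorem bRuns_max_eq (l : List Bool) :
    ((bRuns l).filterMap (fun kn => if kn.1 then some kn.2 else none)).foldl max 0 = maxRun l := by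
  induction l with
  | nil => simp [bRuns, maxRun]
  | cons x xs ih =>
    rcases hx : bRuns xs with _ | ⟨⟨k, n⟩, r⟩
    · have hxe : xs = [] := (bRuns_nil_iff xs).1 hx
      subst hxe
      cases x <;> simp [bRuns, maxRun, lead, foldl_max_cons]
    · have hlead := bRuns_head xs k n r hx
      have hnn := foldl_max_nonneg (r.filterMap (fun kn => if kn.1 then some kn.2 else none))
      rw [hx] at ih
      simp only [bRuns, hx]
      cases x <;> cases k
      · -- x = false, k = false
        rw [if_pos rfl, fmap_false_cons]
        rw [fmap_false_cons] at ih
        simpa [maxRun] using ih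
      · -- x = false, k = true
        rw [if_neg (by simp), fmap_false_cons, fmap_true_cons]
        rw [fmap_true_cons] at ih
        simpa [maxRun] using ih
      · -- x = true, k = false
        rw [if_neg (by simp), fmap_true_cons, fmap_false_cons]
        rw [fmap_false_cons] at ih
        simp only [lead, Bool.false_eq_true, if_false] at hlead
        rw [foldl_max_cons, ih]
        simp [maxRun, hlead]
      · -- x = true, k = true
        rw [if_pos rfl, fmap_true_cons]
        rw [fmap_true_cons, foldl_max_cons] at ih
        simp at hlead
        rw [foldl_max_cons]
        simp [maxRun]
        rw [← ih]
        omega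

-- the mapped index range of A equals B's flag list
theorem range_map_flags (l : List (Int × Int)) (t : Int) (h2 : 2 ≤ l.length) :
    (PySem.List.pyRange 1 l.length 1).map
      (fun i => decide (tupGet (PySem.List.pyGetD l i (0, 0)) t > tupGet (PySem.List.pyGetD l (i - 1) (0, 0)) t))
      = bFlags l t := by
  apply List.ext_getElem
  · simp [PySem.List.length_pyRange_one, bFlags]
  · intro k hk1 hk2
    simp only [List.getElem_map, PySem.List.getElem_pyRange_one, bFlags, List.getElem_zip,
      List.getElem_tail]
    have hk : k < l.length - 1 := by
      simp [PySem.List.length_pyRange_one] at hk1; omega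
    have e1 : (1 : Int) + k - 1 = ((k : Nat) : Int) := by push_cast; ring
    have e2 : (1 : Int) + k = (((k + 1 : Nat)) : Int) := by push_cast; ring
    rw [e1, e2, PySem.List.pyGetD_natCast, PySem.List.pyGetD_natCast]
    rw [List.getD_eq_getElem _ _ (by omega), List.getD_eq_getElem _ _ (by omega)]

-- ===== VERDICT (by name: the statement is the Claim_ definition above) =====
theorem max_consecutive_from_scores_py_spec : Claim_equal_max_consecutive_from_scores_py := by
  intro scores t _hdom _hpre
  unfold Spec_max_consecutive_from_scores_py
  unfold max_consecutive_from_scores_py max_consecutive_from_scores_py_alt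
  by_cases h : scores.length < 2
  · rw [if_pos h]
    have hfl : bFlags scores t = [] := by
      unfold bFlags
      rcases scores with _ | ⟨a, _ | ⟨b, s⟩⟩
      · rfl
      · rfl
      · simp at h
    rw [hfl]
    simp [bRuns]
  · rw [if_neg h]
    have h2 : 2 ≤ scores.length := by omega
    have hle := lead_le_maxRun (bFlags scores t)
    have hnn := maxRun_nonneg (bFlags scores t)
    have hln := lead_nonneg (bFlags scores t)
    calc ((PySem.List.pyRange 1 scores.length 1).foldl
        (fun (st : Int × Int) i =>
          let prev := tupGet (PySem.List.pyGetD scores (i - 1) (0, 0)) t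
          let curr := tupGet (PySem.List.pyGetD scores i (0, 0)) t
          if curr > prev then (max st.1 (st.2 + 1), st.2 + 1) else (st.1, 0))
        (0, 0)).1
        = ((bFlags scores t).foldl stepf (0, 0)).1 := by
          rw [← range_map_flags scores t h2, List.foldl_map]
          have hfun : (fun (st : Int × Int) i =>
              let prev := tupGet (PySem.List.pyGetD scores (i - 1) (0, 0)) t
              let curr := tupGet (PySem.List.pyGetD scores i (0, 0)) t
              if curr > prev then (max st.1 (st.2 + 1), st.2 + 1) else (st.1, 0))
            = (fun (st : Int × Int) i => stepf st
                (decide (tupGet (PySem.List.pyGetD scores i (0, 0)) t >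
                  tupGet (PySem.List.pyGetD scores (i - 1) (0, 0)) t))) := by
            funext st i
            simp [stepf]
          rw [hfun]
      _ = max 0 (max (0 + lead (bFlags scores t)) (maxRun (bFlags scores t))) :=
          foldl_step_eq (bFlags scores t) 0 0 le_rfl le_rfl
      _ = maxRun (bFlags scores t) := by omega
      _ = ((bRuns (bFlags scores t)).filterMap
            (fun kn => if kn.1 then some kn.2 else none)).foldl max 0 :=
          (bRuns_max_eq (bFlags scores t)).symm
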